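-- pv_equiv track=rewrite | github.com/sorimdevs-tech/PL-SQL-to-Java-SpringBoot-Microservices-Accelerator | src/advanced/optimization_engine.py | _has_code_duplication
-- ===== SOURCE A (Python) =====
-- def _has_code_duplication(code: str) -> bool:
--     """Check for code duplication"""
--     # Simple check for repeated code blocks
--     lines = code.split('\n')
--     line_counts = {}
--     for line in lines:
--         line = line.strip()
--         if line and not line.startswith('//'):
--             line_counts[line] = line_counts.get(line, 0) + 1
--
--     return any(count > 3 for count in line_counts.values())
-- ===== SOURCE B (Python) =====
-- def _has_code_duplication(code: str) -> bool:
--     """Check for code duplication (sort-then-scan over runs of equal lines)"""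
--     filtered = [s for s in (line.strip() for line in code.split('\n'))
--                 if s and not s.startswith('//')]
--     prev = None
--     count = 0
--     for line in sorted(filtered):
--         if line == prev:
--             count += 1
--         else:
--             prev = line
--             count = 1
--         if count > 3:
--             return True
--     return False
-- ===== Notes on version B (the rewrite author's own statement) =====
-- stated objective: alternative
-- what changed: Replaced the dict frequency table and final any() over its values by sorting the filtered stripped lines and scanning once for a run of identical adjacent lines longer than 3, returning early.
import Mathlib
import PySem

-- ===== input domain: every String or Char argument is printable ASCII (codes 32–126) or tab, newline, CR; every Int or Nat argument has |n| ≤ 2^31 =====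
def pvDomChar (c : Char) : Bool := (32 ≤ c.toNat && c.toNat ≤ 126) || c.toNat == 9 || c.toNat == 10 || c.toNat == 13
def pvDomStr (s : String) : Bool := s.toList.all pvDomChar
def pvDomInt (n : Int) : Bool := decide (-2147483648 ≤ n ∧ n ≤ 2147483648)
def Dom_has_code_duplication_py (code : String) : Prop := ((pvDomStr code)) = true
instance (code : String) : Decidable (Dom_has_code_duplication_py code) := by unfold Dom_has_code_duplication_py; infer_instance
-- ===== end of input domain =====

-- B replaces A's dict frequency table by sort-then-scan over runs of equal adjacent lines (alternative algorithm, same results).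

-- ===== PORT A =====
-- split? is always `some` here since the separator "\n" is a nonempty literal, so `.getD []` never takes its default
def has_code_duplication_py (code : String) : Bool :=
  let lines := (PySem.Str.split? code "\n").getD []
  let lineCounts : PySem.Dict String Int :=
    lines.foldl (fun d line =>
      let line := PySem.Str.strip line
      if (line != "" && !(PySem.Str.startswith line "//")) then
        d.insert line (d.getD line 0 + 1)
      else d) PySem.Dict.empty
  lineCounts.values.any (fun count => count > 3)

-- ===== PORT B =====
-- the for-loop over the sorted filtered lines, with early return on count > 3
def hcdAltLoop : List String → Option String → Int → Bool
  | [], _, _ => false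
  | line :: rest, prev, count =>
    let count := if some line = prev then count + 1 else 1
    if count > 3 then true else hcdAltLoop rest (some line) count

def has_code_duplication_py_alt (code : String) : Bool :=
  hcdAltLoop
    (PySem.List.sorted
      ((((PySem.Str.split? code "\n").getD []).map PySem.Str.strip).filter
        (fun s => s != "" && !(PySem.Str.startswith s "//")))
      (fun x => x))
    none 0

-- ===== PRECONDITION & SPEC =====
def Spec_has_code_duplication_py (code : String) (out : Bool) : Prop := out = has_code_duplication_py_alt code
instance (code : String) (out : Bool) : Decidable (Spec_has_code_duplication_py code out) := by unfold Spec_has_code_duplication_py; infer_instance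

-- ===== CLAIM (what is proved, stated in full; the proofs are below) =====
def Claim_equal_has_code_duplication_py : Prop := ∀ (code : String), Dom_has_code_duplication_py code → Spec_has_code_duplication_py code (has_code_duplication_py code)

-- ===== LEMMAS AND PROOFS =====

-- the filtered multiset of stripped lines both programs count over
def hcdFiltered (code : String) : List String :=
  ((((PySem.Str.split? code "\n").getD []).map PySem.Str.strip).filter
    (fun s => s != "" && !(PySem.Str.startswith s "//")))

-- run-scan invariant: on a list whose equal elements are adjacent (Pairwise ≤, all elements ≥ prev),
-- the scan fires iff some element's count (plus the pending run length of prev) exceeds 3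
theorem hcdAltLoop_some_iff (l : List String) (p : String) (cnt : Int)
    (hs : l.Pairwise (· ≤ ·)) (hle : ∀ z ∈ l, p ≤ z) (h0 : 0 ≤ cnt) (h3 : cnt ≤ 3) :
    hcdAltLoop l (some p) cnt = true ↔
      ∃ x, (if x = p then cnt else 0) + (l.count x : Int) > 3 := by
  induction l generalizing p cnt with
  | nil =>
    simp only [hcdAltLoop]
    constructor
    · intro h; exact absurd h Bool.false_ne_true
    · rintro ⟨x, hx⟩
      exfalso
      simp only [List.count_nil, Nat.cast_zero] at hx
      split_ifs at hx <;> omega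
  | cons y t ih =>
    have hst : t.Pairwise (· ≤ ·) := hs.of_cons
    have hyt : ∀ z ∈ t, y ≤ z := fun z hz => (List.pairwise_cons.mp hs).1 z hz
    by_cases hyp : y = p
    · subst hyp
      rw [show hcdAltLoop (y :: t) (some y) cnt
            = if cnt + 1 > 3 then true else hcdAltLoop t (some y) (cnt + 1) from by
          simp [hcdAltLoop]]
      by_cases hbig : cnt + 1 > 3
      · rw [if_pos hbig]
        constructor
        · intro _
          refine ⟨y, ?_⟩
          rw [if_pos rfl, List.count_cons_self]
          push_cast; omega
        · intro _; rfl
      · rw [if_neg hbig, ih y (cnt + 1) hst hyt (by omega) (by omega)]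
        refine exists_congr fun x => ?_
        by_cases hxy : x = y
        · subst hxy
          rw [if_pos rfl, if_pos rfl, List.count_cons_self]
          push_cast; omega
        · have hb : (y == x) = false := beq_eq_false_iff_ne.mpr (fun h => hxy h.symm)
          rw [if_neg hxy, if_neg hxy]
          simp only [List.count_cons, hb]
          simp
    · -- a new run starts: p < every element of y :: t, so p does not occur there
      have hpy : p < y := lt_of_le_of_ne (hle y List.mem_cons_self) (fun h => hyp h.symm)
      have hpcount : List.count p (y :: t) = 0 := by
        rw [List.count_eq_zero]
        intro hmem
        rcases List.mem_cons.mp hmem with h | hmem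
        · exact absurd h.symm (ne_of_gt hpy)
        · exact absurd (hyt p hmem) (not_le.mpr hpy)
      rw [show hcdAltLoop (y :: t) (some p) cnt = hcdAltLoop t (some y) 1 from by
          simp [hcdAltLoop, hyp]]
      rw [ih y 1 hst hyt (by norm_num) (by norm_num)]
      constructor
      · rintro ⟨x, hx⟩
        refine ⟨x, ?_⟩
        by_cases hxy : x = y
        · subst hxy
          rw [if_pos rfl] at hx
          rw [if_neg hyp, List.count_cons_self]
          push_cast at hx ⊢; omega
        · rw [if_neg hxy] at hx
          have hxp : ¬ x = p := by
            intro h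
            rw [h] at hx
            have hmem : p ∈ t := List.count_pos_iff.mp (by omega)
            exact absurd (hyt p hmem) (not_le.mpr hpy)
          rw [if_neg hxp]
          have hb : (y == x) = false := beq_eq_false_iff_ne.mpr (fun h => hxy h.symm)
          simp only [List.count_cons, hb] at hx ⊢
          simp only [Bool.false_eq_true, if_false] at hx ⊢
          omega
      · rintro ⟨x, hx⟩
        by_cases hxp : x = p
        · subst hxp
          rw [if_pos rfl, hpcount] at hx
          push_cast at hx; omega
        · rw [if_neg hxp] at hx
          refine ⟨x, ?_⟩
          by_cases hxy : x = y
          · subst hxy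
            rw [if_pos rfl]
            rw [List.count_cons_self] at hx
            push_cast at hx ⊢; omega
          · rw [if_neg hxy]
            have hb : (y == x) = false := beq_eq_false_iff_ne.mpr (fun h => hxy h.symm)
            simp only [List.count_cons, hb] at hx ⊢
            simp only [Bool.false_eq_true, if_false] at hx ⊢
            omega

theorem hcdAltLoop_none_iff (l : List String) (hs : l.Pairwise (· ≤ ·)) :
    hcdAltLoop l none 0 = true ↔ ∃ x, l.count x > 3 := by
  cases l with
  | nil => simp [hcdAltLoop]
  | cons y t =>
    have hyt : ∀ z ∈ t, y ≤ z := fun z hz => (List.pairwise_cons.mp hs).1 z hz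
    rw [show hcdAltLoop (y :: t) none 0 = hcdAltLoop t (some y) 1 from by
        simp [hcdAltLoop]]
    rw [hcdAltLoop_some_iff t y 1 hs.of_cons hyt (by norm_num) (by norm_num)]
    refine exists_congr fun x => ?_
    by_cases hxy : x = y
    · subst hxy
      rw [if_pos rfl, List.count_cons_self]
      omega
    · have hb : (y == x) = false := beq_eq_false_iff_ne.mpr (fun h => hxy h.symm)
      rw [if_neg hxy]
      simp only [List.count_cons, hb]
      simp only [Bool.false_eq_true, if_false]
      omega

-- A's conditional dict-building loop is Counter of the filtered stripped lines
theorem hcd_A_eq_counter (code : String) :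
    has_code_duplication_py code =
      (PySem.Dict.counter (hcdFiltered code)).values.any (fun count => count > 3) := by
  simp only [has_code_duplication_py]
  rw [← List.foldl_map (f := PySem.Str.strip)
        (g := fun (d : PySem.Dict String Int) s =>
          if (s != "" && !(PySem.Str.startswith s "//")) then
            d.insert s (d.getD s 0 + 1)
          else d)]
  rw [PySem.List.foldl_if_eq_foldl_filter]
  rw [PySem.Dict.foldl_insert_getD_add_one_eq_counter]
  rfl

-- A fires iff some filtered line occurs more than 3 times
theorem hcd_A_iff (code : String) :
    has_code_duplication_py code = true ↔ ∃ x, (hcdFiltered code).count x > 3 := by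
  rw [hcd_A_eq_counter]
  rw [show (PySem.Dict.counter (hcdFiltered code)).values
      = ((PySem.Dict.counter (hcdFiltered code)).items.map Prod.snd) from rfl]
  rw [PySem.Dict.items_counter, List.map_map, List.any_map]
  simp only [List.any_eq_true, Function.comp, decide_eq_true_eq]
  constructor
  · rintro ⟨k, _, hk⟩
    exact ⟨k, by exact_mod_cast hk⟩
  · rintro ⟨k, hk⟩
    refine ⟨k, ?_, by exact_mod_cast hk⟩
    rw [PySem.Set.mem_ofList]
    exact List.count_pos_iff.mp (by omega)

-- B fires iff some filtered line occurs more than 3 times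
theorem hcd_B_iff (code : String) :
    has_code_duplication_py_alt code = true ↔ ∃ x, (hcdFiltered code).count x > 3 := by
  rw [show has_code_duplication_py_alt code
      = hcdAltLoop (PySem.List.sorted (hcdFiltered code) (fun x => x)) none 0 from rfl]
  rw [hcdAltLoop_none_iff _ (by simpa using PySem.List.sorted_pairwise (hcdFiltered code) (fun x => x))]
  refine exists_congr fun x => ?_
  rw [(PySem.List.sorted_perm (hcdFiltered code) (fun x => x) false).count_eq]

-- ===== VERDICT (by name: the statement is the Claim_ definition above) =====
theorem has_code_duplication_py_spec : Claim_equal_has_code_duplication_py := by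
  intro code _
  unfold Spec_has_code_duplication_py
  have h := (hcd_A_iff code).trans (hcd_B_iff code).symm
  rcases Bool.eq_false_or_eq_true (has_code_duplication_py code) with hA | hA <;>
    rcases Bool.eq_false_or_eq_true (has_code_duplication_py_alt code) with hB | hB
  · rw [hA, hB]
  · rw [hA, hB] at h ⊢
    exact absurd (h.mp rfl) (by simp)
  · rw [hA, hB] at h ⊢
    exact absurd (h.mpr rfl) (by simp)
  · rw [hA, hB]
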